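-- pv_equiv track=rewrite | github.com/digitaljohnny/Moltbot | skills/golf-course-research/classify-course-type.py | classify_design
-- ===== SOURCE A (Python) =====
-- from typing import Dict, List, Optional, Tuple
--
-- def classify_design(
--     description: Optional[str] = None,
--     course_info: Optional[str] = None
-- ) -> Optional[str]:
--     """
--     Classify design philosophy based on description.
--
--     Returns:
--         Design type key or None if cannot be determined
--     """
--     text = " ".join([
--         description or "",
--         course_info or ""
--     ]).lower()
--
--     # Penal
--     if any(word in text for word in ["penal", "narrow", "punishment", "tight", "demanding"]):
--         return "penal"
--
--     # Strategic
--     if any(word in text for word in ["strategic", "risk-reward", "options", "multiple lines", "choices"]):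
--         return "strategic"
--
--     # Heroic
--     if any(word in text for word in ["heroic", "dramatic", "bold", "carry", "challenging"]):
--         return "heroic"
--
--     # Target
--     if any(word in text for word in ["target", "isolated", "forced carry", "landing zone"]):
--         return "target"
--
--     # Minimalist
--     if any(word in text for word in ["minimalist", "natural", "light touch", "contours", "shaping"]):
--         return "minimalist"
--
--     return None
-- ===== SOURCE B (Python) =====
-- from typing import Dict, List, Optional, Tuple
--
-- NAMES = ["penal", "strategic", "heroic", "target", "minimalist"]
--
-- KEYWORD_RANKS = [
--     ("penal", 0), ("narrow", 0), ("punishment", 0), ("tight", 0), ("demanding", 0),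
--     ("strategic", 1), ("risk-reward", 1), ("options", 1), ("multiple lines", 1), ("choices", 1),
--     ("heroic", 2), ("dramatic", 2), ("bold", 2), ("carry", 2), ("challenging", 2),
--     ("target", 3), ("isolated", 3), ("forced carry", 3), ("landing zone", 3),
--     ("minimalist", 4), ("natural", 4), ("light touch", 4), ("contours", 4), ("shaping", 4),
-- ]
--
-- def classify_design(
--     description: Optional[str] = None,
--     course_info: Optional[str] = None
-- ) -> Optional[str]:
--     text = " ".join([description or "", course_info or ""]).lower()
--     best = None
--     for word, rank in KEYWORD_RANKS:
--         if (best is None or rank < best) and word in text: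
--             best = rank
--     return None if best is None else NAMES[best]
-- ===== Notes on version B (the rewrite author's own statement) =====
-- stated objective: alternative
-- what changed: Replaces five ordered early-return category branches (each an any() over its keyword list) with a single exhaustive pass over a flat (keyword, rank) table that maintains a minimum-rank accumulator and indexes a names table at the end.
import Mathlib
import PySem

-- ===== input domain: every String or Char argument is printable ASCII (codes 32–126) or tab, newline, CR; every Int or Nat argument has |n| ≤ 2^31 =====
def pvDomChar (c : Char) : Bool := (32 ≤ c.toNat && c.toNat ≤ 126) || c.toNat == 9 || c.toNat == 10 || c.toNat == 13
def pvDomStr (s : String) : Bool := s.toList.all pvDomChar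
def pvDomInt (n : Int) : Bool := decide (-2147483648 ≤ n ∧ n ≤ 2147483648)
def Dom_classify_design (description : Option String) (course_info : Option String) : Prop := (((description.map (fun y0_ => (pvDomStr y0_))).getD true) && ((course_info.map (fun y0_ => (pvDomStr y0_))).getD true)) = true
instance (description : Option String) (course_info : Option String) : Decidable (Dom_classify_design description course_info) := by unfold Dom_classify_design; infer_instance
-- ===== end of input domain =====

-- B replaces A's five ordered early-return branches by one exhaustive min-rank pass over a flat keyword table (alternative decomposition, same cost).

-- ===== PORT A =====
def classify_design (description : Option String) (course_info : Option String) : Option String :=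
  let text := PySem.Str.lower (PySem.Str.join " " [description.getD "", course_info.getD ""])
  if ["penal", "narrow", "punishment", "tight", "demanding"].any (fun word => PySem.Str.isIn word text) then some "penal"
  else if ["strategic", "risk-reward", "options", "multiple lines", "choices"].any (fun word => PySem.Str.isIn word text) then some "strategic"
  else if ["heroic", "dramatic", "bold", "carry", "challenging"].any (fun word => PySem.Str.isIn word text) then some "heroic"
  else if ["target", "isolated", "forced carry", "landing zone"].any (fun word => PySem.Str.isIn word text) then some "target"
  else if ["minimalist", "natural", "light touch", "contours", "shaping"].any (fun word => PySem.Str.isIn word text) then some "minimalist"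
  else none

-- ===== PORT B =====
def pvNames : List String := ["penal", "strategic", "heroic", "target", "minimalist"]

def pvKeywordRanks : List (String × Nat) :=
  [("penal", 0), ("narrow", 0), ("punishment", 0), ("tight", 0), ("demanding", 0),
   ("strategic", 1), ("risk-reward", 1), ("options", 1), ("multiple lines", 1), ("choices", 1),
   ("heroic", 2), ("dramatic", 2), ("bold", 2), ("carry", 2), ("challenging", 2),
   ("target", 3), ("isolated", 3), ("forced carry", 3), ("landing zone", 3),
   ("minimalist", 4), ("natural", 4), ("light touch", 4), ("contours", 4), ("shaping", 4)]

-- loop body: if (best is None or rank < best) and word in text: best = rank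
def pvStep (text : String) (best : Option Nat) (p : String × Nat) : Option Nat :=
  if (best.isNone || decide (p.2 < best.getD 0)) && PySem.Str.isIn p.1 text then some p.2 else best

def classify_design_alt (description : Option String) (course_info : Option String) : Option String :=
  let text := PySem.Str.lower (PySem.Str.join " " [description.getD "", course_info.getD ""])
  match pvKeywordRanks.foldl (pvStep text) none with
  | none => none
  | some b => PySem.List.pyGet? pvNames (Int.ofNat b)

-- ===== PRECONDITION & SPEC =====
def Spec_classify_design (description : Option String) (course_info : Option String) (out : Option String) : Prop := out = classify_design_alt description course_info
instance (description : Option String) (course_info : Option String) (out : Option String) : Decidable (Spec_classify_design description course_info out) := by unfold Spec_classify_design; infer_instance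

-- ===== CLAIM (what is proved, stated in full; the proofs are below) =====
def Claim_equal_classify_design : Prop := ∀ (description : Option String) (course_info : Option String), Dom_classify_design description course_info → Spec_classify_design description course_info (classify_design description course_info)

-- ===== LEMMAS AND PROOFS =====

-- once best is set to b, entries of rank ≥ b never change it
theorem pvSkip (text : String) : ∀ (l : List (String × Nat)) (b : Nat), (∀ p ∈ l, b ≤ p.2) → l.foldl (pvStep text) (some b) = some b := by
  intro l
  induction l with
  | nil => intro b _; rfl
  | cons p ps ih =>
      intro b h
      have hb : b ≤ p.2 := h p (List.mem_cons_self ..)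
      have hstep : pvStep text (some b) p = some b := by
        simp [pvStep, Nat.not_lt.mpr hb]
      simp only [List.foldl_cons, hstep]
      exact ih b (fun q hq => h q (List.mem_cons_of_mem _ hq))

-- folding a rank-r keyword group from None: first match of the group wins, else continue
theorem pvGroup (text : String) (r : Nat) : ∀ (kws : List String) (rest : List (String × Nat)), (∀ p ∈ rest, r ≤ p.2) →
    ((kws.map (fun w => (w, r))) ++ rest).foldl (pvStep text) none =
    (if kws.any (fun w => PySem.Str.isIn w text) then some r else rest.foldl (pvStep text) none) := by
  intro kws
  induction kws with
  | nil => intro rest _; simp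
  | cons w ws ih =>
      intro rest h
      by_cases hw : PySem.Str.isIn w text = true
      · have hstep : pvStep text none (w, r) = some r := by unfold pvStep; rw [hw]; rfl
        simp only [List.map_cons, List.cons_append, List.foldl_cons, hstep, List.any_cons, hw,
          Bool.true_or]
        rw [if_pos trivial]
        apply pvSkip
        intro p hp
        rcases List.mem_append.mp hp with hp | hp
        · rcases List.mem_map.mp hp with ⟨w', _, rfl⟩; exact le_refl r
        · exact h p hp
      · have hw' : PySem.Str.isIn w text = false := Bool.eq_false_iff.mpr hw
        have hstep : pvStep text none (w, r) = none := by unfold pvStep; rw [hw']; rfl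
        simp only [List.map_cons, List.cons_append, List.foldl_cons, hstep, List.any_cons, hw',
          Bool.false_or]
        exact ih rest h

theorem pvMain (text : String) :
    (if ["penal", "narrow", "punishment", "tight", "demanding"].any (fun word => PySem.Str.isIn word text) then some "penal"
     else if ["strategic", "risk-reward", "options", "multiple lines", "choices"].any (fun word => PySem.Str.isIn word text) then some "strategic"
     else if ["heroic", "dramatic", "bold", "carry", "challenging"].any (fun word => PySem.Str.isIn word text) then some "heroic"
     else if ["target", "isolated", "forced carry", "landing zone"].any (fun word => PySem.Str.isIn word text) then some "target"
     else if ["minimalist", "natural", "light touch", "contours", "shaping"].any (fun word => PySem.Str.isIn word text) then some "minimalist"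
     else none) =
    (match pvKeywordRanks.foldl (pvStep text) none with
     | none => (none : Option String)
     | some b => PySem.List.pyGet? pvNames (Int.ofNat b)) := by
  have hsplit : pvKeywordRanks =
      (["penal", "narrow", "punishment", "tight", "demanding"].map (fun w => (w, (0:Nat)))) ++
      ((["strategic", "risk-reward", "options", "multiple lines", "choices"].map (fun w => (w, (1:Nat)))) ++
      ((["heroic", "dramatic", "bold", "carry", "challenging"].map (fun w => (w, (2:Nat)))) ++
      ((["target", "isolated", "forced carry", "landing zone"].map (fun w => (w, (3:Nat)))) ++
      ((["minimalist", "natural", "light touch", "contours", "shaping"].map (fun w => (w, (4:Nat)))) ++ ([] : List (String × Nat)))))) := rfl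
  rw [hsplit,
    pvGroup text 0 _ _ (by decide),
    pvGroup text 1 _ _ (by decide),
    pvGroup text 2 _ _ (by decide),
    pvGroup text 3 _ _ (by decide),
    pvGroup text 4 _ _ (by decide)]
  split_ifs <;> rfl

-- ===== VERDICT (by name: the statement is the Claim_ definition above) =====
theorem classify_design_spec : Claim_equal_classify_design := by
  intro description course_info _
  unfold Spec_classify_design classify_design classify_design_alt
  simp only [pvMain]
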